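-- pv_equiv track=rewrite | github.com/MiracleYoung/DataCompare | views/delete/handleRowData.py | get_matchIdx_rowdNum
-- ===== SOURCE A (Python) =====
-- def get_matchIdx_rowdNum(srcTuple,tgtTuple):
--     _srcData = srcTuple[0]
--     _srcStartNum = srcTuple[1]
--
--     _tgtData = tgtTuple[0]
--     _tgtStartNum = tgtTuple[1]
--     #store match rowNum in both file
--     _numlist = []
--     for _i in range(0,len(_srcData)-1):
--         for _j in range(0,len(_tgtData)-1):
--             if _srcData[_i] == _tgtData[_j]:
--                 list1 = (str(_i+_srcStartNum)+','+str(_j+_tgtStartNum)).split(',')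
--                 _numlist.append(list1)
--                 break
--     return _numlist
-- ===== SOURCE B (Python) =====
-- def get_matchIdx_rowdNum(srcTuple, tgtTuple):
--     srcData, srcStartNum = srcTuple
--     tgtData, tgtStartNum = tgtTuple
--     rows = srcData[:-1]
--     # one sweep over the target: a first-match table for ALL source rows at once
--     found = [None] * len(rows)
--     for j, v in enumerate(tgtData[:-1]):
--         found = [j if f is None and s == v else f for f, s in zip(found, rows)]
--     return [[str(i + srcStartNum), str(j + tgtStartNum)]
--             for i, j in enumerate(found) if j is not None]
-- ===== Notes on version B (the rewrite author's own statement) =====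
-- stated objective: alternative
-- what changed: A loops over source rows and re-scans the target list for each one, breaking at the first hit; B inverts the loops: it sweeps the target list ONCE, updating in parallel a per-source-row table of first target matches (filling an entry only while it is still empty), then emits the matched pairs in one final pass over the table, building each pair directly instead of concatenate-then-split.
import Mathlib
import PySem

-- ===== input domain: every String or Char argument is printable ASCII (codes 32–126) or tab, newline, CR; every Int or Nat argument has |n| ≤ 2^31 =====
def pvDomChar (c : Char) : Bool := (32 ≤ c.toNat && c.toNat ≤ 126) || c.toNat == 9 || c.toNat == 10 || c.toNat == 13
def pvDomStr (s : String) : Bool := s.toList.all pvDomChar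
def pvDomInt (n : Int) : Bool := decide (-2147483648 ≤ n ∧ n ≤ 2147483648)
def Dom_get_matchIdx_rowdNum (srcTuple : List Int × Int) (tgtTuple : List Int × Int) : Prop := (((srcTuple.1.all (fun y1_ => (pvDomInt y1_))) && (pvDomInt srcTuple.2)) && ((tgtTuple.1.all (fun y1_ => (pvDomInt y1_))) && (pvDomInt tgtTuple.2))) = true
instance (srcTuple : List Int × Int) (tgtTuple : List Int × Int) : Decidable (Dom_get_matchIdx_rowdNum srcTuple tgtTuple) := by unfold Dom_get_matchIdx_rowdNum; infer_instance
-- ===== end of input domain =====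

-- B inverts A's loops: one sweep over the target fills a per-source-row first-match table,
-- a final pass emits the pairs (objective: alternative, not faster). Neither program mutates its arguments.

-- ===== PORT A =====
-- the row A appends: (str(_i+_srcStartNum)+','+str(_j+_tgtStartNum)).split(',')
def pvRowA (i s j t : Int) : List String :=
  (PySem.Str.split? (PySem.Int.toStr (i + s) ++ "," ++ PySem.Int.toStr (j + t)) ",").getD []

-- A's inner 'for _j in range(0, len(_tgtData)-1)' with its break: first matching target row
def pvInnerA (tgtData : List Int) (v i s t : Int) : List Int → Option (List String)
  | [] => none
  | j :: js =>
      if v = PySem.List.pyGetD tgtData j 0 then some (pvRowA i s j t)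
      else pvInnerA tgtData v i s t js

def get_matchIdx_rowdNum (srcTuple : List Int × Int) (tgtTuple : List Int × Int) : List (List String) :=
  let _srcData := srcTuple.1
  let _srcStartNum := srcTuple.2
  let _tgtData := tgtTuple.1
  let _tgtStartNum := tgtTuple.2
  (PySem.List.pyRange 0 (PySem.List.len _srcData - 1) 1).foldl
    (fun _numlist _i =>
      match pvInnerA _tgtData (PySem.List.pyGetD _srcData _i 0) _i _srcStartNum _tgtStartNum
              (PySem.List.pyRange 0 (PySem.List.len _tgtData - 1) 1) with
      | some list1 => _numlist ++ [list1]
      | none => _numlist) []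

-- ===== PORT B =====
-- found = [j if f is None and s == v else f for f, s in zip(found, rows)]
def pvStep (rows : List Int) (found : List (Option Int)) (j v : Int) : List (Option Int) :=
  (found.zip rows).map (fun q => if q.1 = none ∧ q.2 = v then some j else q.1)

def get_matchIdx_rowdNum_alt (srcTuple : List Int × Int) (tgtTuple : List Int × Int) : List (List String) :=
  let srcData := srcTuple.1
  let srcStartNum := srcTuple.2
  let tgtData := tgtTuple.1
  let tgtStartNum := tgtTuple.2
  let rows := PySem.List.slice srcData none (some (-1))
  let found := (PySem.List.enumerate (PySem.List.slice tgtData none (some (-1)))).foldl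
      (fun fd p => pvStep rows fd p.1 p.2) (List.replicate rows.length none)
  (PySem.List.enumerate found).foldl
    (fun acc p => match p.2 with
      | some j => acc ++ [[PySem.Int.toStr (p.1 + srcStartNum), PySem.Int.toStr (j + tgtStartNum)]]
      | none => acc) []

-- ===== PRECONDITION & SPEC =====
def Spec_get_matchIdx_rowdNum (srcTuple : List Int × Int) (tgtTuple : List Int × Int) (out : List (List String)) : Prop := out = get_matchIdx_rowdNum_alt srcTuple tgtTuple
instance (srcTuple : List Int × Int) (tgtTuple : List Int × Int) (out : List (List String)) : Decidable (Spec_get_matchIdx_rowdNum srcTuple tgtTuple out) := by unfold Spec_get_matchIdx_rowdNum; infer_instance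

-- ===== CLAIM (what is proved, stated in full; the proofs are below) =====
def Claim_equal_get_matchIdx_rowdNum : Prop := ∀ (srcTuple : List Int × Int) (tgtTuple : List Int × Int), Dom_get_matchIdx_rowdNum srcTuple tgtTuple → Spec_get_matchIdx_rowdNum srcTuple tgtTuple (get_matchIdx_rowdNum srcTuple tgtTuple)

-- ===== LEMMAS AND PROOFS =====

-- ',' never occurs in str(n)
theorem pv_comma_not_mem_toChars (n : Int) : ',' ∉ PySem.Int.toChars n := by
  unfold PySem.Int.toChars
  split
  · intro h
    rcases List.mem_cons.mp h with h | h
    · exact absurd h (by decide)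
    · have := Nat.isDigit_of_mem_toDigits (by norm_num) (by norm_num) h
      simp [Char.isDigit] at this
  · intro h
    have := Nat.isDigit_of_mem_toDigits (b := 10) (by norm_num) (by norm_num) h
    simp [Char.isDigit] at this

theorem pv_splitOn_go_no_sep (l : List Char) : ∀ (cur : List Char) (acc : List (List Char)) (fuel : Nat),
    ',' ∉ l → l.length < fuel →
    PySem.Chars.splitOn.go [','] fuel l cur acc = ((cur.reverse ++ l) :: acc).reverse := by
  induction l with
  | nil =>
    intro cur acc fuel _ hf
    match fuel, hf with
    | fuel+1, _ => simp [PySem.Chars.splitOn.go]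
  | cons c rest ih =>
    intro cur acc fuel h hf
    match fuel, hf with
    | fuel+1, hf =>
      have hc : c ≠ ',' := fun hc => h (by simp [hc])
      simp only [PySem.Chars.splitOn.go, List.isPrefixOf]
      rw [if_neg (by simp [Ne.symm hc])]
      rw [ih (c :: cur) acc fuel (fun hm => h (List.mem_cons_of_mem _ hm)) (by simpa using hf)]
      simp

theorem pv_go_two (a : List Char) : ∀ (b cur : List Char) (acc : List (List Char)) (fuel : Nat),
    ',' ∉ a → ',' ∉ b → (a ++ ',' :: b).length < fuel →
    PySem.Chars.splitOn.go [','] fuel (a ++ ',' :: b) cur acc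
      = acc.reverse ++ [cur.reverse ++ a, b] := by
  induction a with
  | nil =>
    intro b cur acc fuel _ hb hf
    match fuel, hf with
    | fuel+1, hf =>
      simp only [List.nil_append, PySem.Chars.splitOn.go, List.isPrefixOf]
      rw [if_pos (by simp)]
      have hlen : b.length < fuel := by simp at hf; omega
      rw [show List.drop (List.length [',']) (',' :: b) = b by simp]
      rw [pv_splitOn_go_no_sep _ _ _ fuel hb hlen]
      simp
  | cons c rest ih =>
    intro b cur acc fuel ha hb hf
    match fuel, hf with
    | fuel+1, hf =>
      have hc : c ≠ ',' := fun hc => ha (by simp [hc])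
      simp only [List.cons_append, PySem.Chars.splitOn.go, List.isPrefixOf]
      rw [if_neg (by simp [Ne.symm hc])]
      rw [ih b (c :: cur) acc fuel (fun hm => ha (List.mem_cons_of_mem _ hm)) hb
        (by simpa using Nat.lt_of_succ_lt_succ hf)]
      simp

theorem pv_splitOn_two (a b : List Char) (ha : ',' ∉ a) (hb : ',' ∉ b) :
    PySem.Chars.splitOn (a ++ ',' :: b) [','] = [a, b] := by
  unfold PySem.Chars.splitOn
  rw [pv_go_two a b [] [] _ ha hb (by omega)]
  simp

theorem pv_rowA_eq (i s j t : Int) :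
    pvRowA i s j t = [PySem.Int.toStr (i + s), PySem.Int.toStr (j + t)] := by
  unfold pvRowA
  rw [PySem.Str.split?.eq_1]
  have h1 : (PySem.Int.toStr (i + s) ++ "," ++ PySem.Int.toStr (j + t)).toList
      = PySem.Int.toChars (i + s) ++ ',' :: PySem.Int.toChars (j + t) := by
    simp [PySem.Int.toList_toStr]
  rw [h1]
  have h2 : (",").toList = [','] := by decide
  rw [h2, PySem.Chars.split?.eq_1]
  rw [if_neg (by decide)]
  rw [pv_splitOn_two _ _ (pv_comma_not_mem_toChars _) (pv_comma_not_mem_toChars _)]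
  simp [← PySem.Int.toList_toStr]

-- A's inner scan over an index range finds the first index of v
theorem pv_innerA_spec (ts : List Int) : ∀ (tgtData : List Int) (n : Nat) (v i s t : Int),
    (∀ k, (hk : k < ts.length) → PySem.List.pyGetD tgtData ((n : Int) + (k : Int)) 0 = ts[k]) →
    pvInnerA tgtData v i s t (PySem.List.pyRange (n : Int) ((n : Int) + (ts.length : Int)) 1)
      = (PySem.List.index? ts v).map (fun k => pvRowA i s ((n : Int) + (k : Int)) t) := by
  induction ts with
  | nil =>
    intro tgtData n v i s t _
    rw [PySem.List.pyRange_one_eq_nil (by simp)]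
    simp [pvInnerA, PySem.List.index?]
  | cons u rest ih =>
    intro tgtData n v i s t hget
    rw [PySem.List.pyRange_one_cons (by simp)]
    simp only [pvInnerA]
    have hu : PySem.List.pyGetD tgtData (n : Int) 0 = u := by
      have := hget 0 (by simp)
      simpa using this
    rw [hu]
    by_cases hv : v = u
    · subst hv
      rw [if_pos rfl, PySem.List.index?_cons_self]
      simp
    · rw [if_neg hv]
      have hrange : ((n : Int) + 1 : Int) = ((n + 1 : Nat) : Int) := by push_cast; ring
      have hbound : (n : Int) + ((rest.length + 1 : Nat) : Int) = ((n+1 : Nat) : Int) + (rest.length : Int) := by push_cast; ring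
      rw [List.length_cons, hbound, hrange]
      rw [ih tgtData (n+1) v i s t (fun k hk => by
        have := hget (k+1) (by simpa using hk)
        rw [show (((n+1 : Nat)):Int) + (k:Int) = (n:Int) + (((k+1:Nat)):Int) by push_cast; ring]
        exact this.trans (by simp))]
      rw [PySem.List.index?_cons_of_ne rest (Ne.symm hv)]
      cases hidx : PySem.List.index? rest v with
      | none => simp
      | some k =>
        show some (pvRowA i s ((((n+1:Nat)):Int) + (k:Int)) t) = some (pvRowA i s ((n:Int) + (((k+1:Nat)):Int)) t)
        congr 2
        push_cast
        ring

-- A's inner scan, with the bound written as in A's code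
theorem pv_innerA_full (tgt : List Int) (v i s t : Int) :
    pvInnerA tgt v i s t (PySem.List.pyRange 0 (PySem.List.len tgt - 1) 1)
      = (PySem.List.index? tgt.dropLast v).map (fun k => pvRowA i s (k : Int) t) := by
  cases tgt with
  | nil =>
    rw [PySem.List.pyRange_one_eq_nil (by simp [PySem.List.len])]
    simp [pvInnerA, PySem.List.index?]
  | cons u rest =>
    have hlen : PySem.List.len (u :: rest) - 1 = ((u :: rest).dropLast.length : Int) := by
      simp [PySem.List.len]
    rw [hlen]
    have := pv_innerA_spec (u :: rest).dropLast (u :: rest) 0 v i s t (fun k hk => by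
      rw [PySem.List.pyGetD_eq_getElem _ _ (by positivity) (by
        simp only [List.length_dropLast] at hk
        push_cast
        omega)]
      rw [List.getElem_dropLast]
      simp)
    simpa using this

-- B's sweep: after folding the enumerated target over pvStep, each table entry is either its
-- old value or the first index of its row's value in the remaining target (offset by k)
theorem pv_step_fold (ts : List Int) : ∀ (k : Int) (rows : List Int) (found : List (Option Int)),
    found.length = rows.length →
    (PySem.List.enumerate ts k).foldl (fun fd p => pvStep rows fd p.1 p.2) found
      = (found.zip rows).map (fun q =>
          match q.1 with
          | some j => some j
          | none => (PySem.List.index? ts q.2).map (fun m => k + (m : Int))) := by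
  induction ts with
  | nil =>
    intro k rows found h
    rw [PySem.List.enumerate_nil, List.foldl_nil]
    have : ∀ q : Option Int × Int,
        (match q.1 with
         | some j => some j
         | none => (PySem.List.index? ([] : List Int) q.2).map (fun m => k + (m : Int))) = q.1 := by
      intro q
      cases q.1 <;> simp [PySem.List.index?]
    rw [List.map_congr_left (fun q _ => this q)]
    exact (List.map_fst_zip (le_of_eq h)).symm
  | cons u rest ih =>
    intro k rows found h
    rw [PySem.List.enumerate_cons, List.foldl_cons]
    rw [ih (k+1) rows (pvStep rows found k u) (by simp [pvStep]; omega)]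
    apply List.ext_getElem
    · simp [pvStep]
    · intro i h1 h2
      have hif : i < found.length := by simp [pvStep] at h1; omega
      have hir : i < rows.length := h ▸ hif
      simp only [List.getElem_map, List.getElem_zip, pvStep]
      cases hfd : found[i] with
      | some j => simp
      | none =>
        by_cases hv : rows[i] = u
        · simp [hv]
          rw [← PySem.List.index?_eq_idxOf?, PySem.List.index?_cons_self]
          simp
        · rw [if_neg (by simp [hv]), PySem.List.index?_cons_of_ne rest (Ne.symm hv)]
          cases PySem.List.index? rest rows[i] with
          | none => simp
          | some m => simp; ring
  
-- the finished table: entry for each source row = first index of its value in the target rows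
theorem pv_found_final (ts rows : List Int) :
    (PySem.List.enumerate ts 0).foldl (fun fd p => pvStep rows fd p.1 p.2)
        (List.replicate rows.length none)
      = rows.map (fun v => (PySem.List.index? ts v).map (fun m => (m : Int))) := by
  rw [pv_step_fold ts 0 rows _ (by simp)]
  apply List.ext_getElem
  · simp
  · intro i h1 h2
    simp [List.getElem_zip]

theorem pv_enumerate_map {α β : Type} (f : α → β) (xs : List α) : ∀ (k : Int),
    PySem.List.enumerate (xs.map f) k = (PySem.List.enumerate xs k).map (fun p => (p.1, f p.2)) := by
  induction xs with
  | nil => intro k; simp [PySem.List.enumerate_nil]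
  | cons x rest ih =>
    intro k
    rw [List.map_cons, PySem.List.enumerate_cons, PySem.List.enumerate_cons, ih (k+1)]
    simp

theorem pv_main (src tgt : List Int) (s t : Int) :
    get_matchIdx_rowdNum (src, s) (tgt, t) = get_matchIdx_rowdNum_alt (src, s) (tgt, t) := by
  unfold get_matchIdx_rowdNum get_matchIdx_rowdNum_alt
  simp only [PySem.List.slice_to_neg_one]
  rw [pv_found_final tgt.dropLast src.dropLast]
  rw [pv_enumerate_map, List.foldl_map]
  rw [PySem.List.enumerate_eq_map_pyRange (d := 0), List.foldl_map]
  cases hsrc : src with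
  | nil =>
    rw [PySem.List.pyRange_one_eq_nil (a := 0) (b := PySem.List.len ([] : List Int) - 1) (by simp [PySem.List.len])]
    rw [PySem.List.pyRange_one_eq_nil (a := 0) (b := PySem.List.len (([] : List Int).dropLast)) (by simp [PySem.List.len])]
    simp
  | cons u rest =>
    have hlen : PySem.List.len (u :: rest) - 1 = PySem.List.len (u :: rest).dropLast := by
      simp [PySem.List.len]
    rw [hlen]
    apply PySem.List.foldl_congr_mem
    intro acc x hx
    have hx' := (PySem.List.mem_pyRange_one).mp hx
    simp only [PySem.List.len] at hx'
    simp only [List.length_dropLast, List.length_cons, Nat.add_sub_cancel] at hx'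
    have hget : PySem.List.pyGetD (u :: rest) x 0 = PySem.List.pyGetD (u :: rest).dropLast x 0 := by
      rw [PySem.List.pyGetD_eq_getElem _ _ hx'.1 (by simp; omega),
          PySem.List.pyGetD_eq_getElem _ _ hx'.1 (by simp; omega)]
      rw [List.getElem_dropLast]
    rw [hget, pv_innerA_full]
    cases hidx : PySem.List.index? tgt.dropLast (PySem.List.pyGetD (u :: rest).dropLast x 0) with
    | none => simp
    | some k => simp [pv_rowA_eq]

-- ===== VERDICT (by name: the statement is the Claim_ definition above) =====
theorem get_matchIdx_rowdNum_spec : Claim_equal_get_matchIdx_rowdNum := by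
  intro st tt _
  show _ = _
  obtain ⟨src, s⟩ := st; obtain ⟨tgt, t⟩ := tt
  exact pv_main src tgt s t
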